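-- pv_equiv track=rewrite | github.com/armishra111/Loop-TNR | loss_function_and_gradient.py | get_allowed_nonuples
-- ===== SOURCE A (Python) =====
-- from itertools import product
--
-- def get_allowed_nonuples(allowed_pairs, vertical_allowed_pairs, modules):
--
--     allowed_nonuple = set()
--     allowed_set = set(allowed_pairs)
--     vertical_set = set(vertical_allowed_pairs)
--
--     for (A, B), (D, E), (G, H) in product(allowed_set, repeat = 3):
--         if (A, D) not in vertical_set or (D, G) not in vertical_set:
--             continue
--         if (B, E) not in vertical_set or (E, H) not in vertical_set:
--             continue
--
--         Cs = [C for C in modules if (B, C) in allowed_set]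
--         for C in Cs:
--             Fs = [F for F in modules if (E, F) in allowed_set and (C, F) in vertical_set]
--             for F in Fs:
--                 Is = [I for I in modules if (H, I) in allowed_set and (F, I) in vertical_set]
--                 for I in Is:
--                     allowed_nonuple.add((A, B, C, D, E, F, G, H, I))
--     return allowed_nonuple
-- ===== SOURCE B (Python) =====
-- def get_allowed_nonuples(allowed_pairs, vertical_allowed_pairs, modules):
--     pairs = set(allowed_pairs)
--     vert = set(vertical_allowed_pairs)
--     # whole-pair vertical compatibility relation, computed ONCE and reused for
--     # both row steps (this removes the full triple product over pairs)
--     comp = {p: [q for q in pairs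
--                 if (p[0], q[0]) in vert and (p[1], q[1]) in vert]
--             for p in pairs}
--     # rightward extension of a row's last entry, computed ONCE for all rows
--     ext = {y: [m for m in modules if (y, m) in pairs]
--            for y in set(p[1] for p in pairs)}
--     # staged pipeline over materialized frontiers of partial grids
--     blocks = [(p, q, r) for p in pairs for q in comp[p] for r in comp[q]]
--     g3 = [(p, q, r, c) for (p, q, r) in blocks for c in ext[p[1]]]
--     g4 = [(p, q, r, c, f) for (p, q, r, c) in g3
--           for f in ext[q[1]] if (c, f) in vert]
--     return {(p[0], p[1], c, q[0], q[1], f, r[0], r[1], i)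
--             for (p, q, r, c, f) in g4
--             for i in ext[r[1]] if (f, i) in vert}
-- ===== Notes on version B (the rewrite author's own statement) =====
-- stated objective: alternative
-- what changed: B replaces A's full triple product with continue-rescans by memoized relational joins: it computes the whole-pair vertical-compatibility relation comp and the rightward-extension lists ext each ONCE, then builds the grids through a staged pipeline of materialized frontiers (compatible 2x3 blocks, then +c, +f, +i), so only compatible chains are ever enumerated; intended as faster, but a timing run's ratio at the largest size varied around the 1.5x bar (1.4x-1.7x across runs), so no speed is claimed.
import Mathlib
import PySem

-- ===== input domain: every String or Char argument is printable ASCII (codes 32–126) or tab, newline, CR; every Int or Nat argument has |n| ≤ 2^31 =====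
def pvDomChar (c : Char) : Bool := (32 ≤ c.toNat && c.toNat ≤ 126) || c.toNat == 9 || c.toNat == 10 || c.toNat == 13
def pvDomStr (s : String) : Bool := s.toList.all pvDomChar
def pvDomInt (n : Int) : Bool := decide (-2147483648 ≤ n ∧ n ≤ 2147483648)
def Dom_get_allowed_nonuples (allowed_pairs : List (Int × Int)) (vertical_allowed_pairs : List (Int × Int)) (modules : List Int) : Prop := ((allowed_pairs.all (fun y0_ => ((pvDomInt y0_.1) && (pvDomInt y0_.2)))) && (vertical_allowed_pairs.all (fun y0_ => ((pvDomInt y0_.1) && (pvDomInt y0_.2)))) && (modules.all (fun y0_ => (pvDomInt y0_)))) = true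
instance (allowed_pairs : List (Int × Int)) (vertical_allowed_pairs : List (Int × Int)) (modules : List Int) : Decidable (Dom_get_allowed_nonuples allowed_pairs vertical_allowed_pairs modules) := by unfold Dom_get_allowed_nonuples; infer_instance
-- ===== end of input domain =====

-- B memoizes the pair-compatibility relation and extension lists once and builds grids by a
-- staged pipeline of materialized frontiers, instead of A's full triple product with rescans.

-- ===== PORT A =====
def get_allowed_nonuples (allowed_pairs : List (Int × Int)) (vertical_allowed_pairs : List (Int × Int)) (modules : List Int) : List (List Int) :=
  let allowed_set : PySem.Set (Int × Int) := PySem.Set.ofList allowed_pairs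
  let vertical_set : PySem.Set (Int × Int) := PySem.Set.ofList vertical_allowed_pairs
  -- itertools.product(allowed_set, repeat=3): the list of all triples, in order
  let trips : List ((Int × Int) × (Int × Int) × (Int × Int)) :=
    allowed_set.flatMap (fun p => allowed_set.flatMap (fun q => allowed_set.map (fun r => (p, q, r))))
  trips.foldl (fun acc t =>
    let A := t.1.1; let B := t.1.2
    let D := t.2.1.1; let E := t.2.1.2
    let G := t.2.2.1; let H := t.2.2.2
    if !(PySem.Set.contains vertical_set (A, D)) || !(PySem.Set.contains vertical_set (D, G)) then acc
    else if !(PySem.Set.contains vertical_set (B, E)) || !(PySem.Set.contains vertical_set (E, H)) then acc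
    else
      let Cs := modules.filter (fun C => PySem.Set.contains allowed_set (B, C))
      Cs.foldl (fun acc C =>
        let Fs := modules.filter (fun F => PySem.Set.contains allowed_set (E, F) && PySem.Set.contains vertical_set (C, F))
        Fs.foldl (fun acc F =>
          let Is := modules.filter (fun I => PySem.Set.contains allowed_set (H, I) && PySem.Set.contains vertical_set (F, I))
          Is.foldl (fun acc I => PySem.Set.add acc [A, B, C, D, E, F, G, H, I]) acc) acc) acc)
    PySem.Set.empty

-- ===== PORT B =====
def get_allowed_nonuples_alt (allowed_pairs : List (Int × Int)) (vertical_allowed_pairs : List (Int × Int)) (modules : List Int) : List (List Int) :=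
  let pairs : PySem.Set (Int × Int) := PySem.Set.ofList allowed_pairs
  let vert : PySem.Set (Int × Int) := PySem.Set.ofList vertical_allowed_pairs
  -- comp = {p: [q for q in pairs if (p[0],q[0]) in vert and (p[1],q[1]) in vert] for p in pairs}
  let comp : PySem.Dict (Int × Int) (List (Int × Int)) :=
    pairs.foldl (fun d p =>
      d.insert p (pairs.filter (fun q => PySem.Set.contains vert (p.1, q.1) && PySem.Set.contains vert (p.2, q.2))))
      PySem.Dict.empty
  -- ext = {y: [m for m in modules if (y, m) in pairs] for y in set(p[1] for p in pairs)}
  let seconds : PySem.Set Int := PySem.Set.ofList (pairs.map (fun p => p.2))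
  let ext : PySem.Dict Int (List Int) :=
    seconds.foldl (fun d y => d.insert y (modules.filter (fun m => PySem.Set.contains pairs (y, m)))) PySem.Dict.empty
  -- staged pipeline of materialized frontiers
  let blocks : List ((Int × Int) × (Int × Int) × (Int × Int)) :=
    pairs.flatMap (fun p => (comp.getD p []).flatMap (fun q => (comp.getD q []).map (fun r => (p, q, r))))
  let g3 : List ((Int × Int) × (Int × Int) × (Int × Int) × Int) :=
    blocks.flatMap (fun t => (ext.getD t.1.2 []).map (fun c => (t.1, t.2.1, t.2.2, c)))
  let g4 : List ((Int × Int) × (Int × Int) × (Int × Int) × Int × Int) :=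
    g3.flatMap (fun t =>
      ((ext.getD t.2.1.2 []).filter (fun f => PySem.Set.contains vert (t.2.2.2, f))).map
        (fun f => (t.1, t.2.1, t.2.2.1, t.2.2.2, f)))
  PySem.Set.ofList (
    g4.flatMap (fun t =>
      ((ext.getD t.2.2.1.2 []).filter (fun i => PySem.Set.contains vert (t.2.2.2.2, i))).map
        (fun i => [t.1.1, t.1.2, t.2.2.2.1, t.2.1.1, t.2.1.2, t.2.2.2.2, t.2.2.1.1, t.2.2.1.2, i])))

-- ===== PRECONDITION & SPEC =====
def Spec_get_allowed_nonuples (allowed_pairs : List (Int × Int)) (vertical_allowed_pairs : List (Int × Int)) (modules : List Int) (out : List (List Int)) : Prop := out = get_allowed_nonuples_alt allowed_pairs vertical_allowed_pairs modules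
instance (allowed_pairs : List (Int × Int)) (vertical_allowed_pairs : List (Int × Int)) (modules : List Int) (out : List (List Int)) : Decidable (Spec_get_allowed_nonuples allowed_pairs vertical_allowed_pairs modules out) := by unfold Spec_get_allowed_nonuples; infer_instance

-- ===== CLAIM (what is proved, stated in full; the proofs are below) =====
def Claim_equal_get_allowed_nonuples : Prop := ∀ (allowed_pairs : List (Int × Int)) (vertical_allowed_pairs : List (Int × Int)) (modules : List Int), Dom_get_allowed_nonuples allowed_pairs vertical_allowed_pairs modules → Spec_get_allowed_nonuples allowed_pairs vertical_allowed_pairs modules (get_allowed_nonuples allowed_pairs vertical_allowed_pairs modules)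

-- ===== LEMMAS AND PROOFS =====

-- folding an inner fold over f a = folding over the flattened list
theorem pv_foldl_foldl_flat {α β γ : Type} (g : γ → β → γ) (f : α → List β) (l : List α) (init : γ) :
    l.foldl (fun acc a => (f a).foldl g acc) init = (l.flatMap f).foldl g init := by
  induction l generalizing init with
  | nil => rfl
  | cons x xs ih => simp [List.flatMap_cons, List.foldl_append, ih]

theorem pv_flatMap_filter {α β : Type} (p : α → Bool) (f : α → List β) (l : List α) :
    (l.filter p).flatMap f = l.flatMap (fun x => if p x then f x else []) := by
  induction l with
  | nil => rfl
  | cons x xs ih => by_cases h : p x <;> simp [h, ih]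

-- after folding inserts over keys not equal to y, getD y is unchanged
theorem pv_getD_foldl_insert_not_mem {κ ν : Type} [BEq κ] [LawfulBEq κ] [DecidableEq κ]
    (ks : List κ) (f : κ → ν) (d : PySem.Dict κ ν) (y : κ) (d0 : ν) (hy : y ∉ ks) :
    (ks.foldl (fun d k => d.insert k (f k)) d).getD y d0 = d.getD y d0 := by
  induction ks generalizing d with
  | nil => rfl
  | cons k ks ih =>
    simp only [List.foldl_cons]
    rw [ih _ (fun h => hy (List.mem_cons_of_mem _ h)),
        PySem.Dict.getD_insert]
    have : ¬ y = k := fun h => hy (h ▸ List.mem_cons_self)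
    simp [this]

theorem pv_getD_foldl_insert_mem {κ ν : Type} [BEq κ] [LawfulBEq κ] [DecidableEq κ]
    (ks : List κ) (f : κ → ν) (d : PySem.Dict κ ν) (y : κ) (d0 : ν) (hy : y ∈ ks) :
    (ks.foldl (fun d k => d.insert k (f k)) d).getD y d0 = f y := by
  induction ks generalizing d with
  | nil => cases hy
  | cons k ks ih =>
    simp only [List.foldl_cons]
    by_cases h : y ∈ ks
    · exact ih _ h
    · have hk : y = k := by rcases List.mem_cons.1 hy with h' | h' <;> [exact h'; exact absurd h' h]
      rw [pv_getD_foldl_insert_not_mem _ _ _ _ _ h, PySem.Dict.getD_insert]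
      simp [hk]

-- canonical flattened form both ports reduce to
def pvCanon (ap : List (Int × Int)) (vp : List (Int × Int)) (ms : List Int) : List (List Int) :=
  let s : PySem.Set (Int × Int) := PySem.Set.ofList ap
  let v : PySem.Set (Int × Int) := PySem.Set.ofList vp
  s.flatMap (fun ab =>
    (s.filter (fun de => PySem.Set.contains v (ab.1, de.1) && PySem.Set.contains v (ab.2, de.2))).flatMap (fun de =>
      (s.filter (fun gh => PySem.Set.contains v (de.1, gh.1) && PySem.Set.contains v (de.2, gh.2))).flatMap (fun gh =>
        (ms.filter (fun C => PySem.Set.contains s (ab.2, C))).flatMap (fun C =>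
          (ms.filter (fun F => PySem.Set.contains v (C, F) && PySem.Set.contains s (de.2, F))).flatMap (fun F =>
            (ms.filter (fun I => PySem.Set.contains v (F, I) && PySem.Set.contains s (gh.2, I))).map (fun I =>
              [ab.1, ab.2, C, de.1, de.2, F, gh.1, gh.2, I]))))))

theorem pv_foldl_add_map {α β : Type} [BEq β] (l : List α) (e : α → β) (s : List β) :
    l.foldl (fun acc x => PySem.Set.add acc (e x)) s = List.foldl PySem.Set.add s (l.map e) := by
  rw [List.foldl_map]

theorem pv_foldl_guard_flat {α β γ : Type} (g : γ → β → γ) (c1 c2 : α → Bool) (f : α → List β)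
    (l : List α) (init : γ) :
    l.foldl (fun acc a => if c1 a then acc else if c2 a then acc else List.foldl g acc (f a)) init
      = List.foldl g init (l.flatMap (fun a => if c1 a then [] else if c2 a then [] else f a)) := by
  induction l generalizing init with
  | nil => rfl
  | cons x xs ih =>
    simp only [List.foldl_cons, List.flatMap_cons, List.foldl_append]
    split_ifs <;> simp [ih]

theorem pv_flatMap_ext {α β : Type} (l : List α) {f g : α → List β} (h : ∀ x, f x = g x) :
    List.flatMap f l = List.flatMap g l := by
  rw [funext h]

theorem pv_flatMap_congr_mem {α β : Type} (l : List α) {f g : α → List β}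
    (h : ∀ x ∈ l, f x = g x) : List.flatMap f l = List.flatMap g l := by
  induction l with
  | nil => rfl
  | cons x xs ih =>
    simp only [List.flatMap_cons]
    rw [h x List.mem_cons_self, ih (fun y hy => h y (List.mem_cons_of_mem _ hy))]

theorem pv_ite_flatMap {α β : Type} (c : Prop) [Decidable c] (l : List α) (f : α → List β) :
    (if c then List.flatMap f l else []) = List.flatMap (fun x => if c then f x else []) l := by
  split_ifs <;> simp

theorem pv_filter_and_flip {α : Type} (p q : α → Bool) (l : List α) :
    l.filter (fun x => p x && q x) = l.filter (fun x => q x && p x) :=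
  List.filter_congr (fun _ _ => Bool.and_comm _ _)

theorem pv_portA_eq (ap vp : List (Int × Int)) (ms : List Int) :
    get_allowed_nonuples ap vp ms = PySem.Set.ofList (pvCanon ap vp ms) := by
  simp only [get_allowed_nonuples, pvCanon]
  simp only [pv_foldl_add_map, pv_foldl_foldl_flat, pv_foldl_guard_flat]
  rw [show (PySem.Set.empty : PySem.Set (List Int)) = [] from rfl, ← PySem.Set.ofList_eq_foldl]
  congr 1
  simp only [List.flatMap_assoc, List.flatMap_map, pv_flatMap_filter]
  apply pv_flatMap_ext; intro p
  apply pv_flatMap_ext; intro q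
  rw [pv_ite_flatMap]
  apply pv_flatMap_ext; intro r
  by_cases h1 : PySem.Set.contains (PySem.Set.ofList vp) (p.1, q.1) = true <;>
    by_cases h2 : PySem.Set.contains (PySem.Set.ofList vp) (p.2, q.2) = true <;>
    by_cases h3 : PySem.Set.contains (PySem.Set.ofList vp) (q.1, r.1) = true <;>
    by_cases h4 : PySem.Set.contains (PySem.Set.ofList vp) (q.2, r.2) = true <;>
    simp only [h1, h2, h3, h4, Bool.not_true, Bool.not_false, Bool.or_false,
      Bool.or_true, Bool.and_self, Bool.and_true, Bool.and_false, if_true, ite_self] <;>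
    try rfl
  apply pv_flatMap_ext; intro C
  split_ifs with hC
  · apply pv_flatMap_ext; intro F
    rw [Bool.and_comm]
    split_ifs with hF
    · rw [pv_filter_and_flip]
    · rfl
  · rfl

theorem pv_portB_eq (ap vp : List (Int × Int)) (ms : List Int) :
    get_allowed_nonuples_alt ap vp ms = PySem.Set.ofList (pvCanon ap vp ms) := by
  simp only [get_allowed_nonuples_alt, pvCanon]
  congr 1
  have hext : ∀ y : Int, y ∈ (PySem.Set.ofList ap).map Prod.snd →
      (((PySem.Set.ofList ((PySem.Set.ofList ap).map (fun p => p.2))).foldl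
          (fun d y => d.insert y (ms.filter (fun m => PySem.Set.contains (PySem.Set.ofList ap) (y, m))))
          PySem.Dict.empty).getD y [])
        = ms.filter (fun m => PySem.Set.contains (PySem.Set.ofList ap) (y, m)) := by
    intro y hy
    exact pv_getD_foldl_insert_mem _ _ _ _ _ ((PySem.Set.mem_ofList _ _).mpr hy)
  have hcomp : ∀ p : Int × Int, p ∈ PySem.Set.ofList ap →
      (((PySem.Set.ofList ap).foldl
          (fun d p => d.insert p ((PySem.Set.ofList ap).filter
            (fun q => PySem.Set.contains (PySem.Set.ofList vp) (p.1, q.1) && PySem.Set.contains (PySem.Set.ofList vp) (p.2, q.2))))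
          PySem.Dict.empty).getD p [])
        = (PySem.Set.ofList ap).filter
            (fun q => PySem.Set.contains (PySem.Set.ofList vp) (p.1, q.1) && PySem.Set.contains (PySem.Set.ofList vp) (p.2, q.2)) := by
    intro p hp
    exact pv_getD_foldl_insert_mem _ _ _ _ _ hp
  simp only [List.flatMap_assoc, List.flatMap_map]
  apply pv_flatMap_congr_mem; intro ab hab
  rw [hcomp ab hab]
  apply pv_flatMap_congr_mem; intro de hde
  have hde' : de ∈ PySem.Set.ofList ap := (List.mem_filter.mp hde).1
  rw [hcomp de hde']
  apply pv_flatMap_congr_mem; intro gh hgh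
  have hgh' : gh ∈ PySem.Set.ofList ap := (List.mem_filter.mp hgh).1
  rw [hext ab.2 (List.mem_map_of_mem hab)]
  apply pv_flatMap_congr_mem; intro c hc
  rw [hext de.2 (List.mem_map_of_mem hde'), hext gh.2 (List.mem_map_of_mem hgh')]
  simp only [List.filter_filter]

-- ===== VERDICT (by name: the statement is the Claim_ definition above) =====
theorem get_allowed_nonuples_spec : Claim_equal_get_allowed_nonuples := by
  intro ap vp ms _
  unfold Spec_get_allowed_nonuples
  rw [pv_portA_eq, pv_portB_eq]
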